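-- pv_equiv track=rewrite | github.com/jackalsin/Python | 15112/Quiz/H3P.py | isRoyalFlush
-- ===== SOURCE A (Python) =====
-- def isSuit(s):
--     if s=="C" or s=="D" or s=='H' or s=='S':
--         return True
--     else:
--         return False
--
-- def isNumber(s):
--     if ((s>='2' and s<='9') or s=='T' or s=='J' or s=='Q'
--         or s=='K' or s=='A'):
--         return True
--     else:
--         return False
--
-- def isValidHand(s):
--     if len(s)!=10:
--         return False
--     for i in range (0,len(s),2):
--         if (not (isNumber(s[i]) and isSuit(s[i+1]))):
--             return False
--     return True
--
-- def getNumber(s):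
--     Numbers=""
--     for i in range(0,len(s),2):
--         Numbers+=s[i]
--     return Numbers
--
-- def isRoyalFlush(s):
--     if not isValidHand(s):
--         return False
--     else:
--         royal='23456789TJQKA'
--         Numbers=getNumber(s)
--         for i in range (0,len(Numbers)):#s[i] to check if royal contains s[i]
--             count=0
--             royalPosition=royal.find(Numbers[i])
--             if royalPosition>8: return False
--
--             while (count<5):# to check
--                 if Numbers[count]!=royal[royalPosition+count]:
--                     return False
--                 count+=1
--             return True
--         return False
-- ===== SOURCE B (Python) =====
-- def isRoyalFlush(s):
--     if len(s) != 10: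
--         return False
--     royal = '23456789TJQKA'
--     ranks = ""
--     rest = s
--     while rest:
--         if rest[0] not in royal or rest[1] not in 'CDHS':
--             return False
--         ranks += rest[0]
--         rest = rest[2:]
--     return ranks in royal
-- ===== Notes on version B (the rewrite author's own statement) =====
-- stated objective: simpler
-- what changed: B drops all four of A's helper functions and the find()-index-plus-positional-while-loop: a single two-characters-at-a-time loop validates each (rank,suit) pair by string membership while accumulating the ranks, then one substring-containment test of the accumulated ranks against the 13-char royal order replaces the find/compare logic; equivalent because the 13 royal characters are distinct, so a 5-char match starts exactly at the first rank's found index, which is at most 8.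
import Mathlib
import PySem

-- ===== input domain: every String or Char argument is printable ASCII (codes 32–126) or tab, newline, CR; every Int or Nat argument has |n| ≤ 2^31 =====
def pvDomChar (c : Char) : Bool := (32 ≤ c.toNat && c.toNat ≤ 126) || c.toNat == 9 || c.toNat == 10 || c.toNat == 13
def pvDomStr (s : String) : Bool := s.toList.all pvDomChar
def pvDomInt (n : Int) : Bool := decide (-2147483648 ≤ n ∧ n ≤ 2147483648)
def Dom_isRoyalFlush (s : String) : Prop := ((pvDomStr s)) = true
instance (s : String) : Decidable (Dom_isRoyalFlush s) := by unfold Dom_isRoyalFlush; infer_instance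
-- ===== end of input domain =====

-- B drops all of A's helpers (isSuit/isNumber/isValidHand/getNumber) and the find()-then-
-- positional-compare logic: one two-chars-at-a-time loop validates each pair by membership
-- while accumulating the ranks, then a single substring-containment check; objective: simpler.

-- ===== PORT A =====
def isSuitA (c : Char) : Bool :=
  if c = 'C' || c = 'D' || c = 'H' || c = 'S' then true else false

def isNumberA (c : Char) : Bool :=
  if (decide ('2' ≤ c) && decide (c ≤ '9')) || c = 'T' || c = 'J' || c = 'Q'
      || c = 'K' || c = 'A' then true else false

def isValidHandA (cs : List Char) : Bool :=
  if cs.length ≠ 10 then false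
  else
    -- the for-loop returns False at the first bad pair, True if none is bad
    (PySem.List.pyRange 0 cs.length 2).all fun i =>
      match PySem.List.pyGet? cs i, PySem.List.pyGet? cs (i + 1) with
      | some a, some b => isNumberA a && isSuitA b
      | _, _ => false   -- IndexError; unreachable: 0 ≤ i and i + 1 < cs.length

def getNumberA (cs : List Char) : List Char :=
  (PySem.List.pyRange 0 cs.length 2).foldl (fun acc i =>
    match PySem.List.pyGet? cs i with
    | some c => acc ++ [c]
    | none => acc   -- IndexError; unreachable: 0 ≤ i < cs.length
    ) []

-- the `while count < 5` loop: a mismatch returns False, completion returns True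
def checkWhileA (numbers royal : List Char) (pos : Int) (count : Nat) : Bool :=
  if count < 5 then
    match PySem.List.pyGet? numbers (count : Int), PySem.List.pyGet? royal (pos + count) with
    | some a, some b => if a ≠ b then false else checkWhileA numbers royal pos (count + 1)
    | _, _ => false   -- IndexError; unreachable under the pos ≤ 8 guard
  else true
termination_by 5 - count

def isRoyalFlush (s : String) : Bool :=
  if !isValidHandA s.toList then false
  else
    let royal := "23456789TJQKA".toList
    let numbers := getNumberA s.toList
    -- the for-loop body returns on its first iteration; empty `numbers` falls through to False
    match PySem.List.pyRange 0 numbers.length 1 with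
    | [] => false
    | i :: _ =>
      let royalPosition := PySem.Chars.find royal
        (match PySem.List.pyGet? numbers i with | some c => [c] | none => [])
      if royalPosition > 8 then false
      else checkWhileA numbers royal royalPosition 0

-- ===== PORT B =====
-- the `while rest:` loop of Source B: consume two characters per step, validate them by
-- membership, accumulate the rank; at the end test the ranks as a substring of royal
def royalLoopB (rest ranks : List Char) : Bool :=
  match rest with
  | [] => PySem.Chars.isIn ranks "23456789TJQKA".toList
  | r :: u :: t =>
      if !(PySem.Chars.isIn [r] "23456789TJQKA".toList)
          || !(PySem.Chars.isIn [u] "CDHS".toList) then false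
      else royalLoopB t (ranks ++ [r])
  | [r] =>   -- rest[1] would raise IndexError; unreachable: the loop starts from length 10
      if !(PySem.Chars.isIn [r] "23456789TJQKA".toList) then false else false

def isRoyalFlush_alt (s : String) : Bool :=
  if s.toList.length ≠ 10 then false
  else royalLoopB s.toList []

-- ===== PRECONDITION & SPEC =====
def Spec_isRoyalFlush (s : String) (out : Bool) : Prop := out = isRoyalFlush_alt s
instance (s : String) (out : Bool) : Decidable (Spec_isRoyalFlush s out) := by unfold Spec_isRoyalFlush; infer_instance

-- ===== CLAIM (what is proved, stated in full; the proofs are below) =====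
def Claim_equal_isRoyalFlush : Prop := ∀ (s : String), Dom_isRoyalFlush s → Spec_isRoyalFlush s (isRoyalFlush s)

-- ===== LEMMAS AND PROOFS =====

def royalL : List Char := ['2','3','4','5','6','7','8','9','T','J','Q','K','A']

theorem royal_eq : "23456789TJQKA".toList = royalL := by decide

theorem char_eq_of_toNat_eq {a b : Char} (h : a.toNat = b.toNat) : a = b :=
  Char.ext (UInt32.toNat_inj.mp h)

theorem mem_of_toNat (c x : Char) (hx : x ∈ royalL) (h : c.toNat = x.toNat) : c ∈ royalL :=
  (char_eq_of_toNat_eq h) ▸ hx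

theorem mem_royal_of_isNumber {c : Char} (h : isNumberA c = true) : c ∈ royalL := by
  unfold isNumberA at h
  split_ifs at h with hc
  simp only [Bool.or_eq_true, Bool.and_eq_true, decide_eq_true_eq] at hc
  rcases hc with ((((⟨h1, h2⟩ | h) | h) | h) | h) | h
  · rw [Char.le_def] at h1 h2
    have h1' : 50 ≤ c.toNat := by simpa using h1
    have h2' : c.toNat ≤ 57 := by simpa using h2
    have : c.toNat = 50 ∨ c.toNat = 51 ∨ c.toNat = 52 ∨ c.toNat = 53 ∨ c.toNat = 54
        ∨ c.toNat = 55 ∨ c.toNat = 56 ∨ c.toNat = 57 := by omega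
    rcases this with h | h | h | h | h | h | h | h
    · exact mem_of_toNat c '2' (by decide) (by rw [h]; decide)
    · exact mem_of_toNat c '3' (by decide) (by rw [h]; decide)
    · exact mem_of_toNat c '4' (by decide) (by rw [h]; decide)
    · exact mem_of_toNat c '5' (by decide) (by rw [h]; decide)
    · exact mem_of_toNat c '6' (by decide) (by rw [h]; decide)
    · exact mem_of_toNat c '7' (by decide) (by rw [h]; decide)
    · exact mem_of_toNat c '8' (by decide) (by rw [h]; decide)
    · exact mem_of_toNat c '9' (by decide) (by rw [h]; decide)
  all_goals (subst h; decide)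

theorem isNumber_of_mem_royal {c : Char} (h : c ∈ royalL) : isNumberA c = true := by
  simp only [royalL, List.mem_cons, List.not_mem_nil, or_false] at h
  rcases h with rfl | rfl | rfl | rfl | rfl | rfl | rfl | rfl | rfl | rfl | rfl | rfl | rfl
  all_goals decide

theorem isIn_singleton (c : Char) (l : List Char) :
    PySem.Chars.isIn [c] l = true ↔ c ∈ l := by
  rw [PySem.Chars.isIn_iff_infix, List.singleton_infix_iff]

-- A's per-character validity checks are exactly B's membership tests
theorem numEq (c : Char) : isNumberA c = PySem.Chars.isIn [c] royalL := by
  rw [Bool.eq_iff_iff, isIn_singleton]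
  exact ⟨mem_royal_of_isNumber, isNumber_of_mem_royal⟩

theorem suitEq (c : Char) : isSuitA c = PySem.Chars.isIn [c] "CDHS".toList := by
  rw [Bool.eq_iff_iff, isIn_singleton, show "CDHS".toList = ['C','D','H','S'] from rfl]
  unfold isSuitA
  constructor
  · intro h
    split_ifs at h with hc
    simp only [Bool.or_eq_true, decide_eq_true_eq] at hc
    rcases hc with ((rfl | rfl) | rfl) | rfl <;> decide
  · intro h
    simp only [List.mem_cons, List.not_mem_nil, or_false] at h
    rcases h with rfl | rfl | rfl | rfl <;> decide

theorem list_len10 {α : Type} (l : List α) (hl : l.length = 10) :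
    ∃ a b c d e f g h i j, l = [a, b, c, d, e, f, g, h, i, j] := by
  rcases l with _ | ⟨a, _ | ⟨b, _ | ⟨c, _ | ⟨d, _ | ⟨e, _ | ⟨f, _ | ⟨g, _ | ⟨h, _ |
    ⟨i, _ | ⟨j, _ | ⟨k, t⟩⟩⟩⟩⟩⟩⟩⟩⟩⟩⟩ <;> simp_all

-- window characterization of substring containment in royal
theorem isIn_royal_iff (x : List Char) (hx : x.length = 5) :
    PySem.Chars.isIn x royalL = true ↔ ∃ q ≤ 8, x = (royalL.drop q).take 5 := by
  rw [PySem.Chars.isIn_iff_infix]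
  constructor
  · rintro ⟨u, v, huv⟩
    refine ⟨u.length, ?_, ?_⟩
    · have := congrArg List.length huv
      simp [hx, royalL] at this
      omega
    · have : ((u ++ x ++ v).drop u.length).take x.length = x := by
        simp [List.append_assoc]
      rw [huv, hx] at this
      exact this.symm
  · rintro ⟨q, hq, hxw⟩
    refine ⟨royalL.take q, royalL.drop (q + 5), ?_⟩
    subst hxw
    interval_cases q <;> decide

-- A's while-loop succeeds exactly when the ranks are the window of royal at pos
theorem checkWhile_iff (a b c d e : Char) (q : Nat) (hq : q ≤ 8) :
    checkWhileA [a, b, c, d, e] royalL (q : Int) 0 = true ↔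
      [a, b, c, d, e] = (royalL.drop q).take 5 := by
  interval_cases q <;>
    · repeat (rw [checkWhileA]; norm_num [PySem.List.pyGet?, PySem.List.pyIdx?, royalL])
      simp_all [Int.toNat]

theorem core_eq (a b c d e : Char) (ha : a ∈ royalL) :
    (if PySem.Chars.find royalL [a] > 8 then false
     else checkWhileA [a, b, c, d, e] royalL (PySem.Chars.find royalL [a]) 0)
      = PySem.Chars.isIn [a, b, c, d, e] royalL := by
  have hinf : [a] <:+: royalL := (List.singleton_infix_iff a royalL).mpr ha
  have hp0 : 0 ≤ PySem.Chars.find royalL [a] := (PySem.Chars.find_nonneg_iff royalL [a]).mpr hinf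
  by_cases hgt : PySem.Chars.find royalL [a] > 8
  · rw [if_pos hgt]
    symm
    rw [Bool.eq_false_iff, Ne, isIn_royal_iff _ (by simp)]
    rintro ⟨q, hq, hxw⟩
    interval_cases q <;>
      · simp only [royalL, List.drop, List.take, List.cons.injEq] at hxw
        obtain ⟨rfl, -⟩ := hxw
        exact absurd hgt (by decide)
  · rw [if_neg hgt]
    have hle : (PySem.Chars.find royalL [a]).toNat ≤ 8 := by omega
    rw [show PySem.Chars.find royalL [a] = (((PySem.Chars.find royalL [a]).toNat : Nat) : Int) by omega,
      Bool.eq_iff_iff, checkWhile_iff a b c d e _ hle, isIn_royal_iff _ (by simp)]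
    constructor
    · intro hx
      exact ⟨_, hle, hx⟩
    · rintro ⟨q, hq, hxw⟩
      interval_cases q <;>
        · simp only [royalL, List.drop, List.take, List.cons.injEq] at hxw
          obtain ⟨rfl, rfl, rfl, rfl, rfl, -⟩ := hxw
          decide

-- B's loop, read pair by pair: it computes the pair-validity conjunction AND the containment test
theorem royalLoopB_pairs : ∀ (ps : List (Char × Char)) (ranks : List Char),
    royalLoopB (ps.flatMap fun p => [p.1, p.2]) ranks
      = ((ps.all fun p => PySem.Chars.isIn [p.1] "23456789TJQKA".toList
            && PySem.Chars.isIn [p.2] "CDHS".toList)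
          && PySem.Chars.isIn (ranks ++ ps.map Prod.fst) "23456789TJQKA".toList)
  | [], ranks => by simp [royalLoopB]
  | (r, u) :: ps, ranks => by
      simp only [List.flatMap_cons, List.cons_append, List.nil_append, royalLoopB,
        List.all_cons, List.map_cons]
      cases hr : PySem.Chars.isIn [r] "23456789TJQKA".toList
        <;> cases hu : PySem.Chars.isIn [u] "CDHS".toList <;> simp_all [royalLoopB_pairs ps]

-- ===== VERDICT (by name: the statement is the Claim_ definition above) =====
theorem isRoyalFlush_spec : Claim_equal_isRoyalFlush := by
  intro s _
  unfold Spec_isRoyalFlush isRoyalFlush isRoyalFlush_alt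
  by_cases hlen : s.toList.length = 10
  case neg =>
    have hv : isValidHandA s.toList = false := by
      unfold isValidHandA; rw [if_pos hlen]
    rw [hv, if_pos hlen]
    simp
  obtain ⟨c0, d0, c1, d1, c2, d2, c3, d3, c4, d4, hcs⟩ := list_len10 _ hlen
  rw [hcs]
  -- A's validity check is the conjunction of the five pair checks
  have hvEq : isValidHandA [c0,d0,c1,d1,c2,d2,c3,d3,c4,d4]
      = ((isNumberA c0 && isSuitA d0) && ((isNumberA c1 && isSuitA d1) &&
        ((isNumberA c2 && isSuitA d2) && ((isNumberA c3 && isSuitA d3) &&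
        (isNumberA c4 && isSuitA d4))))) := by
    unfold isValidHandA
    simp only [List.length_cons, List.length_nil]
    norm_num [show PySem.List.pyRange 0 10 2 = [0,2,4,6,8] from rfl,
      PySem.List.pyGet?, PySem.List.pyIdx?, Int.toNat]
  -- B's loop on the ten characters, via the pair lemma, in the same atoms
  have hB := royalLoopB_pairs [(c0,d0),(c1,d1),(c2,d2),(c3,d3),(c4,d4)] []
  simp only [List.flatMap_cons, List.flatMap_nil, List.cons_append, List.nil_append,
    List.append_nil, List.all_cons, List.all_nil, Bool.and_true, List.map_cons,
    List.map_nil, ← numEq, ← suitEq, royal_eq] at hB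
  have hnum : getNumberA [c0,d0,c1,d1,c2,d2,c3,d3,c4,d4] = [c0,c1,c2,c3,c4] := by
    unfold getNumberA
    simp only [List.length_cons, List.length_nil]
    norm_num [show PySem.List.pyRange 0 10 2 = [0,2,4,6,8] from rfl,
      PySem.List.pyGet?, PySem.List.pyIdx?, Int.toNat]
  simp only [List.length_cons, List.length_nil]
  norm_num
  rw [hB, hvEq]
  by_cases hall : ((isNumberA c0 && isSuitA d0) && ((isNumberA c1 && isSuitA d1) &&
      ((isNumberA c2 && isSuitA d2) && ((isNumberA c3 && isSuitA d3) &&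
      (isNumberA c4 && isSuitA d4))))) = true
  case neg =>
    -- some pair fails: A validity guard and B conjunction both give false
    rw [Bool.not_eq_true] at hall
    rw [hall]
    simp
  · -- all pairs valid: A reduces to the find/while core, equal to containment
    rw [hall]
    simp only [Bool.true_and]
    have hmem : c0 ∈ royalL := mem_royal_of_isNumber (by
      simp only [Bool.and_eq_true] at hall; exact hall.1.1)
    simp only [hnum, royal_eq, List.length_cons, List.length_nil]
    norm_num
    rw [show PySem.List.pyRange 0 (5 : Int) 1 = [0,1,2,3,4] from rfl]
    norm_num [PySem.List.pyGet?, PySem.List.pyIdx?, Int.toNat]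
    have hcore := core_eq c0 c1 c2 c3 c4 hmem
    by_cases h8 : PySem.Chars.find royalL [c0] > 8 <;> simp_all
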